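-- pv_equiv track=rewrite | github.com/Mustafaml786/Hybrid-Neural-Epilepsy-Simulator | analysis/features.py | detect_bursts
-- ===== SOURCE A (Python) =====
-- def detect_bursts(voltage_trace, threshold=-50, min_duration=3):
--     """
--     Simple burst detection based on threshold crossing.
--     Counts consecutive points above threshold with minimum duration.
--     """
--     bursts = 0
--     above_thr = [v > threshold for v in voltage_trace]
--     count = 0
--     for v in above_thr:
--         if v:
--             count += 1
--         elif count >= min_duration:
--             bursts += 1
--             count = 0
--         else:
--             count = 0
--     if count >= min_duration:
--         bursts += 1
--     return bursts
-- ===== SOURCE B (Python) =====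
-- def detect_bursts(voltage_trace, threshold=-50, min_duration=3):
--     # Prefix run-length table + one declarative count of qualifying run boundaries,
--     # instead of A's online counter with branching and a trailing fixup.
--     above = [v > threshold for v in voltage_trace]
--     run = [0]
--     for a in above:
--         run.append(run[-1] + 1 if a else 0)
--     bursts = sum(1 for r, a in zip(run, above) if not a and r >= min_duration)
--     return bursts + (run[-1] >= min_duration)
-- ===== Notes on version B (the rewrite author's own statement) =====
-- stated objective: alternative
-- what changed: Replaces A's online bursts/count state machine with its elif chain and trailing fixup by building a prefix run-length table once and then counting, in one declarative pass, the run boundaries (below-threshold samples and the end of the trace) whose preceding above-threshold run is long enough.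
import Mathlib
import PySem

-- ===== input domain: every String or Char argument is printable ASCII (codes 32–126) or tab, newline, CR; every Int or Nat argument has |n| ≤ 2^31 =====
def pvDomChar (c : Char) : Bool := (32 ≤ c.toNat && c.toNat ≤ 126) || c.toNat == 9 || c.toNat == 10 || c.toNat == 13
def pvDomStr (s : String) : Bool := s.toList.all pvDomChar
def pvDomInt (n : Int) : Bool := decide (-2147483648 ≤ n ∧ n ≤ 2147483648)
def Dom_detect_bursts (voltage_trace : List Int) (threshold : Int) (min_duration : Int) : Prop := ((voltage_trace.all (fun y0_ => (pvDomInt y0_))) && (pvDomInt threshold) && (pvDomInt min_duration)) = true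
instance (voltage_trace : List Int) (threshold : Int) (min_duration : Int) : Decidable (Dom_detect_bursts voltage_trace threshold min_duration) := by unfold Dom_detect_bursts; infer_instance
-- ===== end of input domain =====

-- B replaces A's online counter-with-trailing-fixup by a prefix run-length table and one
-- declarative count of qualifying run boundaries (alternative decomposition, same cost).


-- ===== PORT A =====
-- loop body of A's for-loop: state (bursts, count)
def stepA (min_duration : Int) (s : Int × Int) (v : Bool) : Int × Int :=
  if v then (s.1, s.2 + 1)
  else if s.2 ≥ min_duration then (s.1 + 1, 0)
  else (s.1, 0)

def detect_bursts (voltage_trace : List Int) (threshold : Int) (min_duration : Int) : Int :=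
  let above_thr := voltage_trace.map (fun v => decide (threshold < v))
  let s := above_thr.foldl (stepA min_duration) (0, 0)
  if s.2 ≥ min_duration then s.1 + 1 else s.1

-- ===== PORT B =====
-- loop body of B's run-table loop: run.append(run[-1] + 1 if a else 0)
def stepB (r : List Int) (a : Bool) : List Int :=
  r ++ [if a then r.getLastD 0 + 1 else 0]

def detect_bursts_alt (voltage_trace : List Int) (threshold : Int) (min_duration : Int) : Int :=
  let above := voltage_trace.map (fun v => decide (threshold < v))
  let run := above.foldl stepB [0]
  let bursts : Int :=
    (((run.zip above).filter (fun p => !p.2 && decide (p.1 ≥ min_duration))).length : Int)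
  bursts + (if run.getLastD 0 ≥ min_duration then 1 else 0)

-- ===== PRECONDITION & SPEC =====
def Spec_detect_bursts (voltage_trace : List Int) (threshold : Int) (min_duration : Int) (out : Int) : Prop := out = detect_bursts_alt voltage_trace threshold min_duration
instance (voltage_trace : List Int) (threshold : Int) (min_duration : Int) (out : Int) : Decidable (Spec_detect_bursts voltage_trace threshold min_duration out) := by unfold Spec_detect_bursts; infer_instance

-- ===== CLAIM (what is proved, stated in full; the proofs are below) =====
def Claim_equal_detect_bursts : Prop := ∀ (voltage_trace : List Int) (threshold : Int) (min_duration : Int), Dom_detect_bursts voltage_trace threshold min_duration → Spec_detect_bursts voltage_trace threshold min_duration (detect_bursts voltage_trace threshold min_duration)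

-- ===== LEMMAS AND PROOFS =====

-- common reference recursion: number of boundary positions (a below-threshold sample or the
-- end of the trace) whose preceding run of above-threshold samples, started at length c, is ≥ md
def cnt (md : Int) : List Bool → Int → Int
  | [], c => if c ≥ md then 1 else 0
  | a :: t, c => (if !a && c ≥ md then 1 else 0) + cnt md t (if a then c + 1 else 0)

lemma foldA (md : Int) (l : List Bool) : ∀ b c : Int,
    (if (l.foldl (stepA md) (b, c)).2 ≥ md then (l.foldl (stepA md) (b, c)).1 + 1
     else (l.foldl (stepA md) (b, c)).1) = b + cnt md l c := by
  induction l with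
  | nil => intro b c; simp [cnt]; split_ifs <;> omega
  | cons a t ih =>
    intro b c
    cases a with
    | true => simp [List.foldl_cons, stepA, cnt, ih]
    | false =>
      by_cases h : c ≥ md
      · simp [List.foldl_cons, stepA, cnt, h, ih]
        omega
      · simp [List.foldl_cons, stepA, cnt, h, ih]

def runStep (c : Int) (a : Bool) : Int := if a then c + 1 else 0

lemma foldB (l : List Bool) : ∀ (r : List Int) (x : Int),
    l.foldl stepB (r ++ [x]) = r ++ List.scanl runStep x l := by
  induction l with
  | nil => intro r x; simp [List.scanl]
  | cons a t ih =>
    intro r x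
    have hlast : (r ++ [x]).getLastD 0 = x := by
      simp [List.getLastD_eq_getLast?]
    calc t.foldl stepB (stepB (r ++ [x]) a)
        = t.foldl stepB ((r ++ [x]) ++ [if a then x + 1 else 0]) := by
          simp [stepB]
      _ = (r ++ [x]) ++ List.scanl runStep (if a then x + 1 else 0) t := ih _ _
      _ = r ++ List.scanl runStep x (a :: t) := by
          simp [List.scanl, runStep]

lemma scanl_ne_nil (x : Int) (l : List Bool) : List.scanl runStep x l ≠ [] := by
  cases l <;> simp [List.scanl]

lemma countB (md : Int) (l : List Bool) : ∀ c : Int,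
    ((((List.scanl runStep c l).zip l).filter
        (fun p => !p.2 && decide (p.1 ≥ md))).length : Int)
      + (if (List.scanl runStep c l).getLastD 0 ≥ md then 1 else 0) = cnt md l c := by
  induction l with
  | nil => intro c; simp [List.scanl, cnt]
  | cons a t ih =>
    intro c
    have hscan : List.scanl runStep c (a :: t) = c :: List.scanl runStep (runStep c a) t := by
      simp [List.scanl]
    have hlast : (c :: List.scanl runStep (runStep c a) t).getLastD 0
        = (List.scanl runStep (runStep c a) t).getLastD 0 := by
      rcases h : List.scanl runStep (runStep c a) t with _ | ⟨y, ys⟩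
      · exact absurd h (scanl_ne_nil _ _)
      · simp
    rw [hscan, hlast]
    have := ih (runStep c a)
    by_cases hp : (!a && decide (c ≥ md)) = true
    · simp only [List.zip_cons_cons, List.filter_cons, hp, if_pos]
      simp only [List.length_cons, cnt]
      push_cast
      have ha : (if a = true then c + 1 else 0) = runStep c a := by simp [runStep]
      rw [ha]
      have hb : (if (!a && decide (c ≥ md)) = true then (1:Int) else 0) = 1 := by simp [hp]
      omega
    · simp only [List.zip_cons_cons, List.filter_cons, hp, if_neg, Bool.not_eq_true]
      simp only [cnt]
      have ha : (if a = true then c + 1 else 0) = runStep c a := by simp [runStep]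
      rw [ha]
      have hb : (if (!a && decide (c ≥ md)) = true then (1:Int) else 0) = 0 := by simp [hp]
      omega

-- ===== VERDICT (by name: the statement is the Claim_ definition above) =====
theorem detect_bursts_spec : Claim_equal_detect_bursts := by
  intro vt th md _
  unfold Spec_detect_bursts detect_bursts detect_bursts_alt
  have hA := foldA md (vt.map (fun v => decide (th < v))) 0 0
  have hB0 := foldB (vt.map (fun v => decide (th < v))) [] 0
  simp only [List.nil_append] at hB0
  have hB := countB md (vt.map (fun v => decide (th < v))) 0
  simp only [hB0]
  omega
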